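-- pv_equiv track=rewrite | github.com/davise55/archaeology | src/aphrodisias_api.py | rename_duplicates
-- ===== SOURCE A (Python) =====
-- def rename_duplicates(names):
--     seen = dict()
--
--     for i, name in enumerate(names):
--         if name not in seen:
--             seen[name] = 0
--         else:
--             seen[name] += 1
--             names[i] += f"_{seen[name]}"
--
--     return names
-- ===== SOURCE B (Python) =====
-- def rename_duplicates(names):
--     # Two passes: tally all occurrences first, then walk the list backwards,
--     # decrementing the tally so it yields each position's count of EARLIER
--     # occurrences; build the output back-to-front and splice it in place.
--     total = {}
--     for n in names:
--         total[n] = total.get(n, 0) + 1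
--     out = []
--     for n in reversed(names):
--         total[n] -= 1
--         k = total[n]
--         out.append(n if k == 0 else f"{n}_{k}")
--     names[:] = out[::-1]
--     return names
-- ===== Notes on version B (the rewrite author's own statement) =====
-- stated objective: alternative
-- what changed: B replaces A's single forward pass with its running seen-counter dict (renaming as it goes) by two passes: a full occurrence tally built first, then a backward walk that decrements the tally so it yields each position's count of earlier occurrences, building the output back-to-front and splicing it in place.
import Mathlib
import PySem

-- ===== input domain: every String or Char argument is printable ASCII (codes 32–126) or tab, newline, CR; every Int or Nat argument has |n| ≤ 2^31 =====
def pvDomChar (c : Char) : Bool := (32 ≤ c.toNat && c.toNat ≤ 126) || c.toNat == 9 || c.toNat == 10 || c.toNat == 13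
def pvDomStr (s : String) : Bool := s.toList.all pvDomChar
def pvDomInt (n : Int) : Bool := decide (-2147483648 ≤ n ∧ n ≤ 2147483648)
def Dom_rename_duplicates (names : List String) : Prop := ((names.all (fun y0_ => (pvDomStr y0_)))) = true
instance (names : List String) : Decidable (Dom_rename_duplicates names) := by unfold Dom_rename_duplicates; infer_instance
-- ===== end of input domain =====

-- B replaces A's forward pass with a running seen-counter by two passes: a full tally
-- first, then a backward walk that decrements the tally (so it yields each position's
-- count of earlier occurrences) and builds the output back-to-front; objective:
-- alternative. Both A and B mutate `names` in place in Python; the equivalence proved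
-- here is about the returned list value.

-- ===== PORT A =====
-- `names[i] += f"_{seen[name]}"`: index i is always in range, so pyGetD/pySetD are exact here;
-- `name not in seen` / `seen[name]` are rendered as one `get?` match (none ↔ not in).
def rename_duplicates (names : List String) : List String :=
  ((PySem.List.enumerate names).foldl
    (fun (st : PySem.Dict String Int × List String) (p : Int × String) =>
      match st.1.get? p.2 with
      | none => (st.1.insert p.2 0, st.2)
      | some c => (st.1.insert p.2 (c + 1),
          PySem.List.pySetD st.2 p.1
            (PySem.List.pyGetD st.2 p.1 "" ++ "_" ++ PySem.Int.toStr (c + 1))))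
    (PySem.Dict.empty, names)).2

-- ===== PORT B =====
-- `total[n] -= 1; k = total[n]` is rendered with getD 0: the key is always present
-- (total was tallied from the same list), so getD equals Python's indexing here.
def rename_duplicates_alt (names : List String) : List String :=
  let total := names.foldl (fun d n => d.insert n (d.getD n 0 + 1))
    (PySem.Dict.empty : PySem.Dict String Int)
  let res := names.reverse.foldl
    (fun (st : PySem.Dict String Int × List String) n =>
      let k := st.1.getD n 0 - 1
      (st.1.insert n k, st.2 ++ [if k = 0 then n else n ++ "_" ++ PySem.Int.toStr k]))
    (total, [])
  res.2.reverse

-- ===== PRECONDITION & SPEC =====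
def Spec_rename_duplicates (names : List String) (out : List String) : Prop := out = rename_duplicates_alt names
instance (names : List String) (out : List String) : Decidable (Spec_rename_duplicates names out) := by unfold Spec_rename_duplicates; infer_instance

-- ===== CLAIM (what is proved, stated in full; the proofs are below) =====
def Claim_equal_rename_duplicates : Prop := ∀ (names : List String), Dom_rename_duplicates names → Spec_rename_duplicates names (rename_duplicates names)

-- ===== LEMMAS AND PROOFS =====

-- the value position i of the output carries, given the prefix before i and the original entry
def pvRender (pre : List String) (x : String) : String :=
  if pre.count x = 0 then x else x ++ "_" ++ PySem.Int.toStr (pre.count x : Int)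

-- the common characterisation of both programs' output
def pvAltL (l : List String) : List String :=
  (List.range l.length).map (fun i => pvRender (l.take i) (l.getD i ""))

lemma pvAltL_length (l : List String) : (pvAltL l).length = l.length := by
  simp [pvAltL]

lemma pvAltL_snoc (l : List String) (x : String) :
    pvAltL (l ++ [x]) = pvAltL l ++ [pvRender l x] := by
  simp only [pvAltL, List.length_append, List.length_cons, List.length_nil,
    List.range_succ, List.map_append, List.map_cons, List.map_nil]
  congr 1
  · apply List.map_congr_left
    intro i hi
    rw [List.mem_range] at hi
    rw [List.take_append_of_le_length (by omega), List.getD_append _ _ _ _ (by omega)]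
  · congr 1
    rw [List.take_left]
    congr 1
    simp [List.getD]

-- the invariant of A's loop: the seen-dict holds (prefix count − 1) for every seen name,
-- the prefix of the list is already rendered, the rest untouched
lemma pvLoopA (rest : List String) : ∀ (pre : List String) (d : PySem.Dict String Int),
    (∀ x, d.get? x = if pre.count x = 0 then none
                     else some ((pre.count x : Int) - 1)) →
    ((PySem.List.enumerate rest (pre.length : Int)).foldl
      (fun (st : PySem.Dict String Int × List String) (p : Int × String) =>
        match st.1.get? p.2 with
        | none => (st.1.insert p.2 0, st.2)
        | some c => (st.1.insert p.2 (c + 1),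
            PySem.List.pySetD st.2 p.1
              (PySem.List.pyGetD st.2 p.1 "" ++ "_" ++ PySem.Int.toStr (c + 1))))
      (d, pvAltL pre ++ rest)).2 = pvAltL (pre ++ rest) := by
  induction rest with
  | nil =>
    intro pre d _
    simp [PySem.List.enumerate_nil]
  | cons r rest ih =>
    intro pre d hd
    rw [PySem.List.enumerate_cons, List.foldl_cons]
    by_cases h0 : pre.count r = 0
    · have hget : d.get? r = none := by rw [hd r]; simp [h0]
      have hd' : ∀ x, (d.insert r 0).get? x =
          if (pre ++ [r]).count x = 0 then none
          else some (((pre ++ [r]).count x : Int) - 1) := by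
        intro x
        by_cases hx : x = r
        · subst hx
          rw [PySem.Dict.get?_insert_self]
          simp [List.count_append, h0]
        · rw [PySem.Dict.get?_insert_of_ne _ _ hx, hd x]
          have : (pre ++ [r]).count x = pre.count x := by
            simp [List.count_append, Ne.symm hx]
          rw [this]
      have hns : pvAltL pre ++ r :: rest = pvAltL (pre ++ [r]) ++ rest := by
        rw [pvAltL_snoc]
        simp [pvRender, h0]
      have hlen : (pre.length : Int) + 1 = (((pre ++ [r]).length : Nat) : Int) := by
        simp
      simp only [hget]
      rw [hns, hlen, ih (pre ++ [r]) (d.insert r 0) hd']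
      congr 1
      simp
    · have hget : d.get? r = some ((pre.count r : Int) - 1) := by rw [hd r]; simp [h0]
      have hlenA : (pvAltL pre).length = pre.length := pvAltL_length pre
      have hd' : ∀ x, (d.insert r ((pre.count r : Int) - 1 + 1)).get? x =
          if (pre ++ [r]).count x = 0 then none
          else some (((pre ++ [r]).count x : Int) - 1) := by
        intro x
        by_cases hx : x = r
        · subst hx
          rw [PySem.Dict.get?_insert_self]
          have h1 : (pre ++ [x]).count x = pre.count x + 1 := by
            simp [List.count_append]
          rw [h1, if_neg (by omega)]
          push_cast
          ring_nf
        · rw [PySem.Dict.get?_insert_of_ne _ _ hx, hd x]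
          have : (pre ++ [r]).count x = pre.count x := by
            simp [List.count_append, Ne.symm hx]
          rw [this]
      have hgetD : (pvAltL pre ++ r :: rest).getD pre.length "" = r := by
        rw [← hlenA]
        simp [List.getD]
      have hset : ∀ v, (pvAltL pre ++ r :: rest).set pre.length v
          = pvAltL pre ++ v :: rest := by
        intro v
        rw [← hlenA, List.set_append_right _ _ (le_refl _)]
        simp
      simp only [hget, PySem.List.pyGetD_natCast, PySem.List.pySetD_natCast, hgetD, hset]
      have hv : r ++ "_" ++ PySem.Int.toStr ((pre.count r : Int) - 1 + 1) = pvRender pre r := by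
        have : (pre.count r : Int) - 1 + 1 = (pre.count r : Int) := by ring
        rw [this, pvRender, if_neg h0]
      rw [hv]
      have hns : pvAltL pre ++ pvRender pre r :: rest = pvAltL (pre ++ [r]) ++ rest := by
        rw [pvAltL_snoc]; simp
      have hlen : (pre.length : Int) + 1 = (((pre ++ [r]).length : Nat) : Int) := by simp
      rw [hns, hlen, ih (pre ++ [r]) _ hd']
      congr 1
      simp

lemma pvA_eq (names : List String) : rename_duplicates names = pvAltL names := by
  have h := pvLoopA names [] PySem.Dict.empty (by
    intro x
    rw [PySem.Dict.get?_empty]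
    simp)
  simpa [rename_duplicates] using h

-- the invariant of B's backward pass: the tally holds the count of every name in the
-- still-unprocessed prefix rl.reverse, and the accumulator is the rendered suffix reversed
lemma pvLoopB (rl : List String) : ∀ (d : PySem.Dict String Int) (acc : List String),
    (∀ x, d.getD x 0 = (rl.count x : Int)) →
    (rl.foldl
      (fun (st : PySem.Dict String Int × List String) n =>
        let k := st.1.getD n 0 - 1
        (st.1.insert n k, st.2 ++ [if k = 0 then n else n ++ "_" ++ PySem.Int.toStr k]))
      (d, acc)).2 = acc ++ (pvAltL rl.reverse).reverse := by
  induction rl with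
  | nil => intro d acc _; simp [pvAltL]
  | cons r rl ih =>
    intro d acc hd
    rw [List.foldl_cons]
    have hk : d.getD r 0 - 1 = (rl.count r : Int) := by
      rw [hd r]
      simp
    have hd' : ∀ x, (d.insert r (d.getD r 0 - 1)).getD x 0 = (rl.count x : Int) := by
      intro x
      by_cases hx : x = r
      · subst hx
        rw [PySem.Dict.getD_insert_self, hk]
      · rw [PySem.Dict.getD_insert_of_ne _ _ _ hx, hd x]
        simp [Ne.symm hx]
    have hcnt : rl.count r = rl.reverse.count r := by simp
    have hrender : (if d.getD r 0 - 1 = 0 then r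
        else r ++ "_" ++ PySem.Int.toStr (d.getD r 0 - 1)) = pvRender rl.reverse r := by
      rw [hk, pvRender, ← hcnt]
      by_cases h0 : rl.count r = 0
      · simp [h0]
      · rw [if_neg (by exact_mod_cast h0), if_neg h0]
    rw [ih _ _ hd']
    rw [List.reverse_cons, pvAltL_snoc, hrender]
    simp

lemma pvB_eq (names : List String) : rename_duplicates_alt names = pvAltL names := by
  have htotal : ∀ x, (names.foldl (fun d n => d.insert n (d.getD n 0 + 1))
      (PySem.Dict.empty : PySem.Dict String Int)).getD x 0 = (names.reverse.count x : Int) := by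
    intro x
    rw [PySem.Dict.getD_foldl_insert_add_one]
    simp [PySem.Dict.getD]
  have h := pvLoopB names.reverse _ [] htotal
  simp only [rename_duplicates_alt, h, List.reverse_reverse, List.nil_append]

-- ===== VERDICT (by name: the statement is the Claim_ definition above) =====
theorem rename_duplicates_spec : Claim_equal_rename_duplicates := by
  intro names _
  unfold Spec_rename_duplicates
  rw [pvA_eq, pvB_eq]
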